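-- pv_equiv track=rewrite | github.com/ewkchong/flinky | main.py | getColumnScore
-- ===== SOURCE A (Python) =====
-- from collections import Counter
-- from typing import List
--
-- def getColumnScore(col: List[int]) -> int:
--     """
--     Assumes col is a list of integers of length 0-3.
--     Returns the score of a column: the score are added up, but
--     die of the same type are multiplied.
--     """
--     score = 0
--     ctr = Counter(col)
--     for elem, cnt in ctr.items():
--         if cnt == 1:
--             score += elem
--         elif cnt == 2:
--             score += 4 * elem
--         else:
--             score += 9 * elem
--     return score
-- ===== SOURCE B (Python) =====
-- from typing import List
--
-- def getColumnScore(col: List[int]) -> int: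
--     s = sorted(col)
--     if not s:
--         return 0
--     score, cur, run = 0, s[0], 1
--     for v in s[1:]:
--         if v == cur:
--             run += 1
--         else:
--             score += min(run, 3) ** 2 * cur
--             cur, run = v, 1
--     return score + min(run, 3) ** 2 * cur
-- ===== Notes on version B (the rewrite author's own statement) =====
-- stated objective: alternative
-- what changed: Replaces the Counter-then-branch-table structure by sorting the column and scanning it once, detecting run boundaries and adding min(run,3)^2 * value arithmetically instead of an if/elif/else table over dict items.
import Mathlib
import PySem

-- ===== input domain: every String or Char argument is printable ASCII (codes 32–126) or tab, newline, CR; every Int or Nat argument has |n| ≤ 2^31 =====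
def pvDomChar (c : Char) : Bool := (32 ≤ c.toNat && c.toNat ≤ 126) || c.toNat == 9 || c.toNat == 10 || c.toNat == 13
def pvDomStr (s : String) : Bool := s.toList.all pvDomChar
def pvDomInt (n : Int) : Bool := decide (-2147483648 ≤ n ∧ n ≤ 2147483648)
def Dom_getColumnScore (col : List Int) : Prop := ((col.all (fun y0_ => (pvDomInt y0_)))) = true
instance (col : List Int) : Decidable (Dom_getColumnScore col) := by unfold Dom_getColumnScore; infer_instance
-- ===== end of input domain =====

-- B replaces A's Counter-then-branch-table by sort + one run-length scan (same exact values; alternative structure, not faster).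


-- ===== PORT A =====
-- for elem, cnt in Counter(col).items(): score += elem / 4*elem / 9*elem according to cnt
def getColumnScore (col : List Int) : Int :=
  (PySem.Dict.counter col).items.foldl
    (fun score p =>
      if p.2 == 1 then score + p.1
      else if p.2 == 2 then score + 4 * p.1
      else score + 9 * p.1) 0

-- ===== PORT B =====
-- sort, then one pass with state (score, cur, run); at each run boundary add min(run,3)^2 * cur
def getColumnScore_alt (col : List Int) : Int :=
  match PySem.List.sorted col (fun x => x) false with
  | [] => 0
  | c0 :: rest =>
    let st := rest.foldl
      (fun (st : Int × Int × Int) v =>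
        if v == st.2.1 then (st.1, st.2.1, st.2.2 + 1)
        else (st.1 + (min st.2.2 3) ^ 2 * st.2.1, v, 1))
      (0, c0, 1)
    st.1 + (min st.2.2 3) ^ 2 * st.2.1

-- ===== PRECONDITION & SPEC =====
def Spec_getColumnScore (col : List Int) (out : Int) : Prop := out = getColumnScore_alt col
instance (col : List Int) (out : Int) : Decidable (Spec_getColumnScore col out) := by unfold Spec_getColumnScore; infer_instance

-- ===== CLAIM (what is proved, stated in full; the proofs are below) =====
def Claim_equal_getColumnScore : Prop := ∀ (col : List Int), Dom_getColumnScore col → Spec_getColumnScore col (getColumnScore col)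

-- ===== LEMMAS AND PROOFS =====

-- the common multiplier min(c,3)^2 and the count-weighted sum both ports reduce to
def fmul (c : Int) : Int := (min c 3) ^ 2

def colSum (t : List Int) : Int :=
  ((PySem.Set.ofList t).map (fun k => fmul (t.count k) * k)).sum

-- dedup commutes with filter
lemma ofList_filter (p : Int → Bool) (ys : List Int) :
    (PySem.Set.ofList ys).filter p = PySem.Set.ofList (ys.filter p) := by
  induction ys with
  | nil => rfl
  | cons x ys ih =>
    rw [PySem.Set.ofList_cons]
    simp only [PySem.Set.discard]
    by_cases hp : p x = true
    · rw [List.filter_cons_of_pos hp, List.filter_cons_of_pos hp,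
        PySem.Set.ofList_cons]
      simp only [PySem.Set.discard]
      rw [← ih, List.filter_filter, List.filter_filter]
      congr 1
      apply List.filter_congr
      intro a _
      rw [Bool.and_comm]
    · rw [List.filter_cons_of_neg hp, List.filter_cons_of_neg hp, ← ih,
        List.filter_filter]
      apply List.filter_congr
      intro a _
      by_cases ha : a = x
      · subst ha; simp [hp]
      · simp [ha]

lemma colSum_perm {t t' : List Int} (h : t.Perm t') : colSum t = colSum t' := by
  unfold colSum
  have hperm : (PySem.Set.ofList t).Perm (PySem.Set.ofList t') := by
    rw [List.perm_ext_iff_of_nodup (PySem.Set.nodup_ofList t) (PySem.Set.nodup_ofList t')]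
    intro a; rw [PySem.Set.mem_ofList, PySem.Set.mem_ofList]; exact h.mem_iff
  calc ((PySem.Set.ofList t).map (fun k => fmul (t.count k) * k)).sum
      = ((PySem.Set.ofList t).map (fun k => fmul (t'.count k) * k)).sum := by
        congr 1; exact List.map_congr_left (fun k _ => by rw [h.count_eq])
    _ = ((PySem.Set.ofList t').map (fun k => fmul (t'.count k) * k)).sum :=
        (hperm.map _).sum_eq

lemma colSum_cons (y : Int) (ys : List Int) :
    colSum (y :: ys) = fmul ((y :: ys).count y) * y + colSum (ys.filter (fun v => v ≠ y)) := by
  unfold colSum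
  rw [PySem.Set.ofList_cons, List.map_cons, List.sum_cons]
  congr 1
  have hset : (PySem.Set.ofList ys).discard y
      = PySem.Set.ofList (ys.filter (fun v => v ≠ y)) := by
    rw [← ofList_filter]
    simp only [PySem.Set.discard]
    apply List.filter_congr
    intro a _
    simp [ne_eq, decide_not, Bool.beq_eq_decide_eq]
  rw [hset]
  apply congrArg
  apply List.map_congr_left
  intro k hk
  have hkmem : k ∈ ys.filter (fun v => v ≠ y) := (PySem.Set.mem_ofList _ k).mp hk
  have hkne : k ≠ y := by
    have := List.of_mem_filter hkmem
    simpa using this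
  have h1 : (y :: ys).count k = ys.count k :=
    List.count_cons_of_ne hkne.symm
  have h2 : (ys.filter (fun v => v ≠ y)).count k = ys.count k :=
    List.count_filter (by simpa using hkne)
  rw [h1, h2]

-- A's branch table equals the min(c,3)^2 multiplier on positive counts
lemma branch_eq (n : Nat) (hn : 1 ≤ n) (k : Int) :
    (if ((n : Int)) == 1 then k else if ((n : Int)) == 2 then 4 * k else 9 * k)
      = fmul (n : Int) * k := by
  unfold fmul
  by_cases h1 : n = 1
  · subst h1; norm_num
  · by_cases h2 : n = 2
    · subst h2; norm_num
    · have h3 : (3 : Int) ≤ (n : Int) := by omega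
      have hmin : min ((n : Int)) 3 = 3 := min_eq_right h3
      have e1 : (((n : Int)) == 1) = false := by
        simp only [beq_eq_false_iff_ne, ne_eq]; omega
      have e2 : (((n : Int)) == 2) = false := by
        simp only [beq_eq_false_iff_ne, ne_eq]; omega
      rw [e1, e2, hmin]
      norm_num

-- A's foldl over counter items equals colSum
lemma portA_eq_colSum (col : List Int) : getColumnScore col = colSum col := by
  unfold getColumnScore
  rw [PySem.Dict.items_counter]
  have hstep : (fun (score : Int) (p : Int × Int) =>
      if p.2 == 1 then score + p.1 else if p.2 == 2 then score + 4 * p.1 else score + 9 * p.1)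
      = (fun (score : Int) (p : Int × Int) =>
      score + (if p.2 == 1 then p.1 else if p.2 == 2 then 4 * p.1 else 9 * p.1)) := by
    funext acc p; split_ifs <;> rfl
  rw [hstep, PySem.List.foldl_add, List.map_map, zero_add]
  unfold colSum
  congr 1
  apply List.map_congr_left
  intro k hk
  have hmem : k ∈ col := (PySem.Set.mem_ofList col k).mp hk
  have hcnt : 1 ≤ col.count k := List.count_pos_iff.mpr hmem
  simpa using branch_eq (col.count k) hcnt k

-- B's scan-loop invariant: folding the run-length scan over a sorted suffix s,
-- starting with `run` copies of `cur` already seen, yields the run-length sum.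
lemma scan_loop (s : List Int) :
    s.Pairwise (· ≤ ·) →
    ∀ (score cur run : Int), (∀ y ∈ s, cur ≤ y) →
    (let st := s.foldl
        (fun (st : Int × Int × Int) v =>
          if v == st.2.1 then (st.1, st.2.1, st.2.2 + 1)
          else (st.1 + (min st.2.2 3) ^ 2 * st.2.1, v, 1)) (score, cur, run)
     st.1 + (min st.2.2 3) ^ 2 * st.2.1)
    = score + fmul (run + s.count cur) * cur + colSum (s.filter (fun v => v ≠ cur)) := by
  induction s with
  | nil =>
    intro _ score cur run _
    simp [colSum, fmul]
  | cons y ys ih =>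
    intro hp score cur run hge
    have hp' : ys.Pairwise (· ≤ ·) := hp.of_cons
    have hyle : ∀ z ∈ ys, y ≤ z := (List.pairwise_cons.mp hp).1
    by_cases hy : y = cur
    · subst hy
      simp only [List.foldl_cons, beq_self_eq_true, if_true]
      have hrec := ih hp' score y (run + 1) hyle
      simp only at hrec
      have hcnt : (y :: ys).count y = ys.count y + 1 := by simp
      have hfil : (y :: ys).filter (fun v => v ≠ y) = ys.filter (fun v => v ≠ y) := by simp
      rw [hcnt, hfil,
        show run + ((ys.count y + 1 : Nat) : Int) = run + 1 + (ys.count y : Int) by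
          push_cast; ring]
      exact hrec
    · have hne : (y == cur) = false := by simpa using hy
      simp only [List.foldl_cons, hne, Bool.false_eq_true, if_false]
      have hcur_lt : cur < y := lt_of_le_of_ne (hge y List.mem_cons_self) (fun h => hy h.symm)
      have hcur_not : cur ∉ y :: ys := by
        intro hmem
        rcases List.mem_cons.mp hmem with h | h
        · exact hy h.symm
        · exact absurd (hyle cur h) (by omega)
      have hcnt0 : (y :: ys).count cur = 0 := List.count_eq_zero.mpr hcur_not
      have hfil : (y :: ys).filter (fun v => v ≠ cur) = y :: ys := by
        apply List.filter_eq_self.mpr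
        intro a ha
        simp only [ne_eq, decide_eq_true_eq]
        intro h; subst h; exact hcur_not ha
      have hrec := ih hp' (score + (min run 3) ^ 2 * cur) y 1 hyle
      simp only at hrec
      rw [hrec, hcnt0, hfil, colSum_cons y ys,
        show (y :: ys).count y = ys.count y + 1 by simp,
        show ((ys.count y + 1 : Nat) : Int) = 1 + (ys.count y : Int) by push_cast; ring]
      have hfr : fmul (run + ((0 : Nat) : Int)) = (min run 3) ^ 2 := by
        simp [fmul]
      rw [hfr]
      ring

lemma portB_eq_colSum (col : List Int) : getColumnScore_alt col = colSum col := by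
  have hperm := PySem.List.sorted_perm col (fun x => x) false
  cases h : PySem.List.sorted col (fun x => x) false with
  | nil =>
    rw [h] at hperm
    have hnil : col = [] := hperm.symm.eq_nil
    have : getColumnScore_alt col = 0 := by
      unfold getColumnScore_alt; rw [h]
    rw [this, hnil]
    rfl
  | cons c0 rest =>
    rw [h] at hperm
    have hpw : (c0 :: rest).Pairwise (· ≤ ·) := by
      have hq := PySem.List.sorted_pairwise col (fun x => x)
      rw [h] at hq
      exact hq
    have hrest : rest.Pairwise (· ≤ ·) := hpw.of_cons
    have hge : ∀ y ∈ rest, c0 ≤ y := (List.pairwise_cons.mp hpw).1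
    have hred : getColumnScore_alt col
        = (let st := rest.foldl
            (fun (st : Int × Int × Int) v =>
              if v == st.2.1 then (st.1, st.2.1, st.2.2 + 1)
              else (st.1 + (min st.2.2 3) ^ 2 * st.2.1, v, 1)) (0, c0, 1)
           st.1 + (min st.2.2 3) ^ 2 * st.2.1) := by
      unfold getColumnScore_alt; rw [h]
    rw [hred, scan_loop rest hrest 0 c0 1 hge,
      colSum_perm hperm.symm, colSum_cons c0 rest,
      show (c0 :: rest).count c0 = rest.count c0 + 1 by simp,
      show ((rest.count c0 + 1 : Nat) : Int) = 1 + (rest.count c0 : Int) by push_cast; ring]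
    ring

-- ===== VERDICT (by name: the statement is the Claim_ definition above) =====
theorem getColumnScore_spec : Claim_equal_getColumnScore := by
  intro col _
  unfold Spec_getColumnScore
  rw [portA_eq_colSum, portB_eq_colSum]
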